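-- pv_equiv track=rewrite | github.com/antigenomics/mirpy | mir/resources/segments/build_gene_library.py | check_library_consistency
-- ===== SOURCE A (Python) =====
-- from collections import defaultdict
--
-- Row = tuple[str, str, str, str, str]  # (species, locus, gene, allele, sequence)
--
-- def check_library_consistency(
--     olga_rows: list[Row],
--     imgt_rows: list[Row],
-- ) -> str:
--     """Return a formatted consistency report comparing OLGA and IMGT libraries.
--
--     The report lists:
--
--     * ``(species, locus, gene)`` keys present in one library but not the
--       other.
--     * For every shared key: OLGA allele count, IMGT allele count, number of
--       alleles present in both, number exclusive to each library.
--
--     Args: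
--         olga_rows: Rows from the OLGA gene library.
--         imgt_rows: Rows from the IMGT gene library.
--
--     Returns:
--         Multi-line string suitable for appending to the build log.
--     """
--     olga_by_key: dict[tuple[str, str, str], set[str]] = defaultdict(set)
--     imgt_by_key: dict[tuple[str, str, str], set[str]] = defaultdict(set)
--     for s, l, g, allele, _ in olga_rows:
--         olga_by_key[(s, l, g)].add(allele)
--     for s, l, g, allele, _ in imgt_rows:
--         imgt_by_key[(s, l, g)].add(allele)
--
--     olga_keys = set(olga_by_key)
--     imgt_keys = set(imgt_by_key)
--     all_keys  = sorted(olga_keys | imgt_keys)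
--
--     lines: list[str] = []
--
--     only_olga = sorted(olga_keys - imgt_keys)
--     only_imgt = sorted(imgt_keys - olga_keys)
--
--     if only_olga:
--         lines.append("[keys in OLGA, absent in IMGT]")
--         for s, l, g in only_olga:
--             lines.append(f"  {s} {l} {g}: {len(olga_by_key[(s, l, g)])} alleles")
--         lines.append("")
--
--     if only_imgt:
--         lines.append("[keys in IMGT, absent in OLGA]")
--         for s, l, g in only_imgt:
--             lines.append(f"  {s} {l} {g}: {len(imgt_by_key[(s, l, g)])} alleles")
--         lines.append("")
--
--     col = (10, 7, 5, 8, 8, 8, 10, 10)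
--     header = (
--         f"{'species':<{col[0]}}{'locus':<{col[1]}}{'gene':<{col[2]}}"
--         f"{'OLGA':>{col[3]}}{'IMGT':>{col[4]}}{'shared':>{col[5]}}"
--         f"{'only-OLGA':>{col[6]}}{'only-IMGT':>{col[7]}}"
--     )
--     lines.append("[allele counts per (species, locus, gene)]")
--     lines.append(header)
--     lines.append("-" * len(header))
--     for key in all_keys:
--         s, l, g  = key
--         o_set    = olga_by_key.get(key, set())
--         i_set    = imgt_by_key.get(key, set())
--         n_shared = len(o_set & i_set)
--         n_only_o = len(o_set - i_set)
--         n_only_i = len(i_set - o_set)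
--         lines.append(
--             f"{s:<{col[0]}}{l:<{col[1]}}{g:<{col[2]}}"
--             f"{len(o_set):>{col[3]}}{len(i_set):>{col[4]}}{n_shared:>{col[5]}}"
--             f"{n_only_o:>{col[6]}}{n_only_i:>{col[7]}}"
--         )
--
--     return "\n".join(lines)
-- ===== SOURCE B (Python) =====
-- Row = tuple[str, str, str, str, str]  # (species, locus, gene, allele, sequence)
--
--
-- def check_library_consistency(
--     olga_rows: list[Row],
--     imgt_rows: list[Row],
-- ) -> str:
--     """Consistency report without any per-key dicts: flatten both libraries into
--     ONE sorted list of distinct tagged records (species, locus, gene, allele, tag),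
--     then a single linear scan over the key-contiguous groups derives every count
--     arithmetically (shared = group size - number of distinct alleles, by
--     inclusion-exclusion), rather than via set union/intersection/difference."""
--     recs = sorted(
--         {(s, l, g, a, "O") for s, l, g, a, _ in olga_rows}
--         | {(s, l, g, a, "I") for s, l, g, a, _ in imgt_rows}
--     )
--
--     # one pass: rows = [(key, n_olga, n_imgt, n_shared)] in sorted key order
--     rows = []
--     i, n = 0, len(recs)
--     while i < n:
--         k = recs[i][:3]
--         n_o = 0
--         alleles = set()
--         j = i
--         while j < n and recs[j][:3] == k:
--             n_o += recs[j][4] == "O"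
--             alleles.add(recs[j][3])
--             j += 1
--         rows.append((k, n_o, (j - i) - n_o, (j - i) - len(alleles)))
--         i = j
--
--     only_olga = [(k, no) for k, no, ni, _ in rows if ni == 0]
--     only_imgt = [(k, ni) for k, no, ni, _ in rows if no == 0]
--
--     lines: list[str] = []
--
--     if only_olga:
--         lines.append("[keys in OLGA, absent in IMGT]")
--         for (s, l, g), cnt in only_olga:
--             lines.append(f"  {s} {l} {g}: {cnt} alleles")
--         lines.append("")
--
--     if only_imgt:
--         lines.append("[keys in IMGT, absent in OLGA]")
--         for (s, l, g), cnt in only_imgt: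
--             lines.append(f"  {s} {l} {g}: {cnt} alleles")
--         lines.append("")
--
--     col = (10, 7, 5, 8, 8, 8, 10, 10)
--     header = (
--         f"{'species':<{col[0]}}{'locus':<{col[1]}}{'gene':<{col[2]}}"
--         f"{'OLGA':>{col[3]}}{'IMGT':>{col[4]}}{'shared':>{col[5]}}"
--         f"{'only-OLGA':>{col[6]}}{'only-IMGT':>{col[7]}}"
--     )
--     lines.append("[allele counts per (species, locus, gene)]")
--     lines.append(header)
--     lines.append("-" * len(header))
--     for (s, l, g), n_o, n_i, n_sh in rows:
--         lines.append(
--             f"{s:<{col[0]}}{l:<{col[1]}}{g:<{col[2]}}"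
--             f"{n_o:>{col[3]}}{n_i:>{col[4]}}{n_sh:>{col[5]}}"
--             f"{n_o - n_sh:>{col[6]}}{n_i - n_sh:>{col[7]}}"
--         )
--
--     return "\n".join(lines)
-- ===== Notes on version B (the rewrite author's own statement) =====
-- stated objective: alternative
-- what changed: B drops A's per-key dicts of allele sets and the set union/difference/intersection algebra entirely: it flattens both libraries into one sorted list of distinct tagged (species,locus,gene,allele,tag) records and a single index-based scan over its key-contiguous groups computes every count arithmetically (shared = group size minus number of distinct alleles, by inclusion-exclusion; one-sided = count minus shared).
import Mathlib
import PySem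

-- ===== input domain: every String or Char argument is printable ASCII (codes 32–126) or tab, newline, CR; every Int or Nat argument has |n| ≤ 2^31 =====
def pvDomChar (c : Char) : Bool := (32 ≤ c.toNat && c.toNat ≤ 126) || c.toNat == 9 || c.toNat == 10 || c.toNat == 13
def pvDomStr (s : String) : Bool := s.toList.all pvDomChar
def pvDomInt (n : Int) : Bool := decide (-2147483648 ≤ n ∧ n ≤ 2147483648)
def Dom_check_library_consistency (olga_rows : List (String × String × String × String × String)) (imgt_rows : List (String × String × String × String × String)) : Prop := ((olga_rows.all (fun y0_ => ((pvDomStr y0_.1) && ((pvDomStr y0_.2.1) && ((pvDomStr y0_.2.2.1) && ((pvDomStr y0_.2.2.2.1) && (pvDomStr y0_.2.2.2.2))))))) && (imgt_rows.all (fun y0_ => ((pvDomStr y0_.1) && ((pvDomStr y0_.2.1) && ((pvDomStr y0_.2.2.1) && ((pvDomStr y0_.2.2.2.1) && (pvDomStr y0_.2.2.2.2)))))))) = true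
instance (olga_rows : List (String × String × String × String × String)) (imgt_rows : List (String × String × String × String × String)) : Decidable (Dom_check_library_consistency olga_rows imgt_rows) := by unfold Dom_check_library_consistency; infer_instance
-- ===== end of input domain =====

-- B drops A's per-key dicts of allele sets and all set union/difference/intersection algebra: it
-- flattens both libraries into one sorted list of distinct tagged records and a single linear scan
-- over its key-contiguous groups derives every count arithmetically by inclusion-exclusion
-- (objective: alternative decomposition; same output, not claimed faster).

-- ===== shared formatting helpers (both Pythons' f-strings are identical) =====
-- f"{s:<w}" — left-justify, no truncation (exact for any string; width by code points)
def clcLJust (s : String) (w : Nat) : String := String.ofList (s.toList ++ List.replicate (w - s.toList.length) ' ')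
-- f"{x:>w}" — right-justify (exact)
def clcRJust (s : String) (w : Nat) : String := String.ofList (List.replicate (w - s.toList.length) ' ' ++ s.toList)
def clcOnlyLine (k : String × String × String) (n : Int) : String :=
  "  " ++ k.1 ++ " " ++ k.2.1 ++ " " ++ k.2.2 ++ ": " ++ PySem.Int.toStr n ++ " alleles"
def clcHeader : String :=
  clcLJust "species" 10 ++ clcLJust "locus" 7 ++ clcLJust "gene" 5 ++ clcRJust "OLGA" 8 ++
    clcRJust "IMGT" 8 ++ clcRJust "shared" 8 ++ clcRJust "only-OLGA" 10 ++ clcRJust "only-IMGT" 10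
-- "-" * len(header)
def clcDashes : String := String.ofList (List.replicate clcHeader.toList.length '-')

-- ===== PORT A =====
def clcKey (r : String × String × String × String × String) : String × String × String := (r.1, r.2.1, r.2.2.1)
def clcAllele (r : String × String × String × String × String) : String := r.2.2.2.1
-- Python tuple comparison on (s, l, g) is lexicographic over code-point-lexicographic strings;
-- encoded EXACTLY as the lexicographic order on List String (Lean's List/String '<' match CPython's).
def clcKeyList (k : String × String × String) : List String := [k.1, k.2.1, k.2.2]
-- A's table line, computed from the two allele sets exactly as A's f-string does
def clcCountLine (k : String × String × String) (o i : PySem.Set String) : String :=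
  let nShared := PySem.Set.len (PySem.Set.inter o i)
  let nOnlyO := PySem.Set.len (PySem.Set.diff o i)
  let nOnlyI := PySem.Set.len (PySem.Set.diff i o)
  clcLJust k.1 10 ++ clcLJust k.2.1 7 ++ clcLJust k.2.2 5 ++
    clcRJust (PySem.Int.toStr (PySem.Set.len o)) 8 ++ clcRJust (PySem.Int.toStr (PySem.Set.len i)) 8 ++
    clcRJust (PySem.Int.toStr nShared) 8 ++ clcRJust (PySem.Int.toStr nOnlyO) 10 ++
    clcRJust (PySem.Int.toStr nOnlyI) 10
-- 'for s, l, g, allele, _ in rows: by_key[(s, l, g)].add(allele)' with by_key a defaultdict(set)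
-- (A runs this loop once per library)
def clcSetDict (rows : List (String × String × String × String × String)) :
    PySem.Dict (String × String × String) (PySem.Set String) :=
  rows.foldl
    (fun d r => d.modify (clcKey r) PySem.Set.empty (fun st => PySem.Set.add st (clcAllele r)))
    PySem.Dict.empty

def check_library_consistency (olga_rows : List (String × String × String × String × String)) (imgt_rows : List (String × String × String × String × String)) : String :=
  let olga_by_key := clcSetDict olga_rows
  let imgt_by_key := clcSetDict imgt_rows
  let olga_keys : PySem.Set (String × String × String) := PySem.Set.ofList olga_by_key.keys
  let imgt_keys : PySem.Set (String × String × String) := PySem.Set.ofList imgt_by_key.keys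
  let all_keys := PySem.List.sorted (PySem.Set.union olga_keys imgt_keys) clcKeyList
  let only_olga := PySem.List.sorted (PySem.Set.diff olga_keys imgt_keys) clcKeyList
  let only_imgt := PySem.List.sorted (PySem.Set.diff imgt_keys olga_keys) clcKeyList
  let lines : List String := []
  -- olga_by_key[k] with k ∈ only_olga ⊆ olga_keys always succeeds; the .getD default is unreachable
  let lines := if only_olga.isEmpty then lines else
    (only_olga.foldl
      (fun acc k => acc ++ [clcOnlyLine k (PySem.Set.len ((olga_by_key.get? k).getD PySem.Set.empty))])
      (lines ++ ["[keys in OLGA, absent in IMGT]"])) ++ [""]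
  let lines := if only_imgt.isEmpty then lines else
    (only_imgt.foldl
      (fun acc k => acc ++ [clcOnlyLine k (PySem.Set.len ((imgt_by_key.get? k).getD PySem.Set.empty))])
      (lines ++ ["[keys in IMGT, absent in OLGA]"])) ++ [""]
  let lines := lines ++ ["[allele counts per (species, locus, gene)]", clcHeader, clcDashes]
  let lines := all_keys.foldl
    (fun acc k => acc ++ [clcCountLine k (olga_by_key.getD k PySem.Set.empty) (imgt_by_key.getD k PySem.Set.empty)])
    lines
  PySem.Str.join "\n" lines

-- ===== PORT B =====
-- tagged records (species, locus, gene, allele, "O"/"I") of Source B's two set comprehensions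
def clcTagO (r : String × String × String × String × String) : String × String × String × String × String :=
  (r.1, r.2.1, r.2.2.1, r.2.2.2.1, "O")
def clcTagI (r : String × String × String × String × String) : String × String × String × String × String :=
  (r.1, r.2.1, r.2.2.1, r.2.2.2.1, "I")
-- sorted() on 5-tuples of strings = lexicographic order on their 5-element List String
def clcKey5List (t : String × String × String × String × String) : List String :=
  [t.1, t.2.1, t.2.2.1, t.2.2.2.1, t.2.2.2.2]
def clcTag (t : String × String × String × String × String) : String := t.2.2.2.2
-- Source B's 'recs = sorted({tagged olga records} | {tagged imgt records})'
def clcRecs (olga_rows imgt_rows : List (String × String × String × String × String)) :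
    List (String × String × String × String × String) :=
  PySem.List.sorted
    (PySem.Set.union (PySem.Set.ofList (olga_rows.map clcTagO)) (PySem.Set.ofList (imgt_rows.map clcTagI)))
    clcKey5List
-- Source B's table line from the three counts (same f-string widths)
def clcCountLineN (k : String × String × String) (nO nI nSh : Int) : String :=
  clcLJust k.1 10 ++ clcLJust k.2.1 7 ++ clcLJust k.2.2 5 ++
    clcRJust (PySem.Int.toStr nO) 8 ++ clcRJust (PySem.Int.toStr nI) 8 ++
    clcRJust (PySem.Int.toStr nSh) 8 ++ clcRJust (PySem.Int.toStr (nO - nSh)) 10 ++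
    clcRJust (PySem.Int.toStr (nI - nSh)) 10
-- Source B's index-based double while loop: the inner 'while j < n and recs[j][:3] == k' scans exactly
-- the maximal prefix of the remainder with key k (= takeWhile / dropWhile of that test), counting
-- 'recs[j][4] == "O"' and accumulating the allele set as it goes; 'i = j' continues on the rest
def clcScan : List (String × String × String × String × String) →
    List ((String × String × String) × Int × Int × Int)
  | [] => []
  | r :: rs =>
    let k := clcKey r
    let grp := (r :: rs).takeWhile (fun x => clcKey x == k)
    let st := grp.foldl
      (fun (p : Int × PySem.Set String) x =>
        ((if clcTag x == "O" then p.1 + 1 else p.1), PySem.Set.add p.2 (clcAllele x)))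
      (0, PySem.Set.empty)
    let sz : Int := PySem.List.len grp
    (k, st.1, sz - st.1, sz - PySem.Set.len st.2) ::
      clcScan ((r :: rs).dropWhile (fun x => clcKey x == k))
  termination_by xs => xs.length
  decreasing_by
    simp only [List.dropWhile]
    have : (clcKey r == clcKey r) = true := by simp
    rw [this]
    exact Nat.lt_succ_of_le (List.length_dropWhile_le _ _)

def check_library_consistency_alt (olga_rows : List (String × String × String × String × String)) (imgt_rows : List (String × String × String × String × String)) : String :=
  let recs := clcRecs olga_rows imgt_rows
  let rows := clcScan recs
  let only_olga := (rows.filter (fun t => t.2.2.1 == 0)).map (fun t => (t.1, t.2.1))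
  let only_imgt := (rows.filter (fun t => t.2.1 == 0)).map (fun t => (t.1, t.2.2.1))
  let lines : List String := []
  let lines := if only_olga.isEmpty then lines else
    (only_olga.foldl (fun acc p => acc ++ [clcOnlyLine p.1 p.2])
      (lines ++ ["[keys in OLGA, absent in IMGT]"])) ++ [""]
  let lines := if only_imgt.isEmpty then lines else
    (only_imgt.foldl (fun acc p => acc ++ [clcOnlyLine p.1 p.2])
      (lines ++ ["[keys in IMGT, absent in OLGA]"])) ++ [""]
  let lines := lines ++ ["[allele counts per (species, locus, gene)]", clcHeader, clcDashes]
  let lines := rows.foldl (fun acc t => acc ++ [clcCountLineN t.1 t.2.1 t.2.2.1 t.2.2.2]) lines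
  PySem.Str.join "\n" lines

-- ===== PRECONDITION & SPEC =====
def Spec_check_library_consistency (olga_rows : List (String × String × String × String × String)) (imgt_rows : List (String × String × String × String × String)) (out : String) : Prop := out = check_library_consistency_alt olga_rows imgt_rows
instance (olga_rows : List (String × String × String × String × String)) (imgt_rows : List (String × String × String × String × String)) (out : String) : Decidable (Spec_check_library_consistency olga_rows imgt_rows out) := by unfold Spec_check_library_consistency; infer_instance

-- ===== CLAIM (what is proved, stated in full; the proofs are below) =====
def Claim_equal_check_library_consistency : Prop := ∀ (olga_rows : List (String × String × String × String × String)) (imgt_rows : List (String × String × String × String × String)), Dom_check_library_consistency olga_rows imgt_rows → Spec_check_library_consistency olga_rows imgt_rows (check_library_consistency olga_rows imgt_rows)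

-- ===== LEMMAS AND PROOFS =====

-- the alleles a library's rows contribute to key k, in row order
def clcAll (rows : List (String × String × String × String × String)) (k : String × String × String) : List String :=
  (rows.filter (fun r => clcKey r == k)).map clcAllele
-- the distinct alleles at key k (= the value A's defaultdict holds)
def clcOk (rows : List (String × String × String × String × String)) (k : String × String × String) : PySem.Set String :=
  PySem.Set.ofList (clcAll rows k)
-- the tagged records of B's recs that belong to key k
def clcG (xs : List (String × String × String × String × String)) (k : String × String × String) :
    List (String × String × String × String × String) :=
  xs.filter (fun x => clcKey x == k)
theorem clcKeyList_injective : Function.Injective clcKeyList := by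
  rintro ⟨a, b, c⟩ ⟨d, e, f⟩ h
  simp [clcKeyList] at h
  simp [h.1, h.2.1, h.2.2]

theorem clcKey5List_injective : Function.Injective clcKey5List := by
  rintro ⟨a, b, c, d, e⟩ ⟨a', b', c', d', e'⟩ h
  simp [clcKey5List] at h
  simp [h.1, h.2.1, h.2.2.1, h.2.2.2.1, h.2.2.2.2]

theorem clc_update_empty {α : Type} [BEq α] (l : List α) :
    PySem.Set.update (PySem.Set.empty : PySem.Set α) l = PySem.Set.ofList l := by
  rw [PySem.Set.ofList_eq_foldl]; rfl

-- the ports' sorted-call elaborates List String's LT via core's List.instLT; the PySem order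
-- lemmas use Mathlib's LinearOrder (List String): the two instances are definitionally equal
theorem clc_sorted_inst {α : Type} (xs : List α) (key : α → List String) :
    @PySem.List.sorted α (List String) List.instLT (fun a b => a.decidableLT b) xs key false
      = @PySem.List.sorted α (List String) List.instLinearOrder.toLT LinearOrder.toDecidableLT xs key false := by
  rw [@PySem.List.sorted_eq_foldl_insertBy _ _ List.instLT (fun a b => a.decidableLT b) xs key,
    @PySem.List.sorted_eq_foldl_insertBy _ _ List.instLinearOrder.toLT LinearOrder.toDecidableLT xs key]
  congr 1
  funext acc x
  congr 1
  funext a b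
  exact decide_eq_decide.mpr Iff.rfl

-- lexicographic monotonicity: if a 5-record precedes another, its 3-key is ≤ the other's
theorem clc_lt5_le3 (x y : String × String × String × String × String)
    (h : clcKey5List x < clcKey5List y) : clcKeyList (clcKey x) ≤ clcKeyList (clcKey y) := by
  obtain ⟨x1, x2, x3, x4, x5⟩ := x
  obtain ⟨y1, y2, y3, y4, y5⟩ := y
  simp only [clcKey5List, clcKeyList, clcKey] at *
  have h' : List.Lex (· < ·) [x1, x2, x3, x4, x5] [y1, y2, y3, y4, y5] := h
  cases h' with
  | rel h1 => exact le_of_lt (List.Lex.rel h1)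
  | cons h1 =>
    cases h1 with
    | rel h2 => exact le_of_lt (List.Lex.cons (List.Lex.rel h2))
    | cons h2 =>
      cases h2 with
      | rel h3 => exact le_of_lt (List.Lex.cons (List.Lex.cons (List.Lex.rel h3)))
      | cons h3 => exact le_refl _

-- membership of B's record list
theorem clc_mem_recs (olga imgt : List (String × String × String × String × String))
    (x : String × String × String × String × String) :
    x ∈ clcRecs olga imgt ↔ x ∈ olga.map clcTagO ∨ x ∈ imgt.map clcTagI := by
  rw [clcRecs, PySem.List.mem_sorted, PySem.Set.mem_union, PySem.Set.mem_ofList, PySem.Set.mem_ofList]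

theorem clc_nodup_recs (olga imgt : List (String × String × String × String × String)) :
    (clcRecs olga imgt).Nodup := by
  rw [clcRecs]
  exact ((PySem.List.sorted_perm _ _ _).nodup_iff).mpr
    (PySem.Set.nodup_union _ _ (PySem.Set.nodup_ofList _))

theorem clc_pairwise_recs (olga imgt : List (String × String × String × String × String)) :
    (clcRecs olga imgt).Pairwise (fun a b => clcKey5List a < clcKey5List b) := by
  have hnd0 := clc_nodup_recs olga imgt
  rw [clcRecs] at hnd0 ⊢
  rw [clc_sorted_inst] at hnd0 ⊢
  have hle := PySem.List.sorted_pairwise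
    (PySem.Set.union (PySem.Set.ofList (olga.map clcTagO)) (PySem.Set.ofList (imgt.map clcTagI)))
    clcKey5List
  have hnd' : List.Pairwise (fun a b => a ≠ b) _ := hnd0
  exact (hle.and hnd').imp (fun h => lt_of_le_of_ne h.1 (fun he => h.2 (clcKey5List_injective he)))

-- a prefix test that is downward closed along the list makes takeWhile/dropWhile act as filters
theorem clc_takeWhile_eq_filter {α : Type} (p : α → Bool) :
    ∀ (xs : List α), xs.Pairwise (fun a b => p b = true → p a = true) →
      xs.takeWhile p = xs.filter p ∧ xs.dropWhile p = xs.filter (fun x => !(p x)) := by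
  intro xs
  induction xs with
  | nil => simp
  | cons x xs ih =>
    intro h
    rw [List.pairwise_cons] at h
    by_cases hx : p x = true
    · have := ih h.2
      simp [List.dropWhile_cons, hx, this.1, this.2]
    · have hall : ∀ b ∈ xs, p b = false := by
        intro b hb
        cases hpb : p b
        · rfl
        · exact absurd (h.1 b hb hpb) hx
      have hfp : xs.filter p = [] := List.filter_eq_nil_iff.mpr (by intro b hb; simp [hall b hb])
      have hfn : xs.filter (fun b => !(p b)) = xs :=
        List.filter_eq_self.mpr (by intro b hb; simp [hall b hb])
      constructor
      · simp [hx, hfp]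
      · simp [List.dropWhile_cons, hx, hfn]

-- the key test against the head key is downward closed on a strictly sorted record list
theorem clc_key_test_closed (r : String × String × String × String × String)
    (rs : List (String × String × String × String × String))
    (h : (r :: rs).Pairwise (fun a b => clcKey5List a < clcKey5List b)) :
    (r :: rs).Pairwise (fun a b => (clcKey b == clcKey r) = true → (clcKey a == clcKey r) = true) := by
  rw [List.pairwise_cons] at h
  rw [List.pairwise_cons]
  constructor
  · intro b _ _; simp
  · refine h.2.imp_of_mem ?_
    intro a b ha hb hab hpb
    have h1 : clcKeyList (clcKey r) ≤ clcKeyList (clcKey a) := clc_lt5_le3 r a (h.1 a ha)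
    have h2 : clcKeyList (clcKey a) ≤ clcKeyList (clcKey b) := clc_lt5_le3 a b hab
    have hb' : clcKey b = clcKey r := by simpa using hpb
    rw [hb'] at h2
    have : clcKeyList (clcKey a) = clcKeyList (clcKey r) := le_antisymm h2 h1
    simp [clcKeyList_injective this]

-- a nonempty list of identical keys collapses to a singleton set
theorem clc_ofList_const {k : String × String × String} :
    ∀ (l : List (String × String × String)), l ≠ [] → (∀ y ∈ l, y = k) →
      PySem.Set.ofList l = [k] := by
  intro l
  induction l with
  | nil => intro h _; exact absurd rfl h
  | cons y ys ih =>
    intro _ hall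
    have hy : y = k := hall y (by simp)
    subst hy
    rw [PySem.Set.ofList_cons]
    have : PySem.Set.discard (PySem.Set.ofList ys) y = [] := by
      rw [List.eq_nil_iff_forall_not_mem]
      intro z hz
      rw [PySem.Set.mem_discard] at hz
      exact hz.2 (hall z (by simp [(PySem.Set.mem_ofList _ _).mp hz.1]))
    rw [this]

-- two nodup lists with the same members have the same length
theorem clc_len_eq_of_mem {α : Type} [DecidableEq α] (s t : List α) (hs : s.Nodup) (ht : t.Nodup)
    (hmem : ∀ x, x ∈ s ↔ x ∈ t) : s.length = t.length :=
  ((List.perm_ext_iff_of_nodup hs ht).mpr hmem).length_eq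

-- the scan over any strictly key5-sorted list computes, per distinct key in order, the number of
-- "O"-tagged records, the number of remaining records, and (size - #distinct alleles)
theorem clc_scan_eq (n : Nat) :
    ∀ (xs : List (String × String × String × String × String)), xs.length ≤ n →
    xs.Pairwise (fun a b => clcKey5List a < clcKey5List b) →
    clcScan xs = (PySem.Set.ofList (xs.map clcKey)).map (fun k =>
      (k, ((clcG xs k).countP (fun x => clcTag x == "O") : Int),
          ((clcG xs k).length : Int) - ((clcG xs k).countP (fun x => clcTag x == "O") : Int),
          ((clcG xs k).length : Int) - ((PySem.Set.ofList ((clcG xs k).map clcAllele)).length : Int))) := by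
  induction n with
  | zero =>
    intro xs hl _
    have : xs = [] := List.eq_nil_of_length_eq_zero (Nat.le_zero.mp hl)
    subst this
    simp [clcScan]
  | succ n ihn =>
    intro xs hl hp
    cases xs with
    | nil => simp [clcScan]
    | cons r rs =>
      have hdc := clc_key_test_closed r rs hp
      obtain ⟨htw, hdw⟩ := clc_takeWhile_eq_filter (fun x => clcKey x == clcKey r) (r :: rs) hdc
      have hpr : (clcKey r == clcKey r) = true := by simp
      have hrest : (r :: rs).filter (fun x => !(clcKey x == clcKey r))
          = rs.filter (fun x => !(clcKey x == clcKey r)) := by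
        simp [List.filter_cons, hpr]
      have hne : (r :: rs).filter (fun x => clcKey x == clcKey r) ≠ [] := by
        simp [List.filter_cons, hpr]
      have hallk : ∀ y ∈ ((r :: rs).filter (fun x => clcKey x == clcKey r)).map clcKey,
          y = clcKey r := by
        intro y hy
        obtain ⟨x, hx, rfl⟩ := List.mem_map.mp hy
        have hpx : (clcKey x == clcKey r) = true := (List.mem_filter.mp hx).2
        exact eq_of_beq hpx
      have hsplit : r :: rs = (r :: rs).filter (fun x => clcKey x == clcKey r)
          ++ (r :: rs).filter (fun x => !(clcKey x == clcKey r)) := by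
        rw [← htw, ← hdw, List.takeWhile_append_dropWhile]
      have hkne : ∀ k ∈ PySem.Set.ofList
          (((r :: rs).filter (fun x => !(clcKey x == clcKey r))).map clcKey), k ≠ clcKey r := by
        intro k hk
        obtain ⟨x, hx, rfl⟩ := List.mem_map.mp ((PySem.Set.mem_ofList _ _).mp hk)
        have hxne := List.of_mem_filter hx
        simp only [Bool.not_eq_true'] at hxne
        intro he
        rw [he] at hxne
        simp at hxne
      have hkeys : PySem.Set.ofList ((r :: rs).map clcKey)
          = clcKey r :: PySem.Set.ofList
              (((r :: rs).filter (fun x => !(clcKey x == clcKey r))).map clcKey) := by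
        conv_lhs => rw [hsplit]
        rw [List.map_append, PySem.Set.ofList_append,
          clc_ofList_const _ (by simpa using hne) hallk,
          PySem.Set.update_eq_append_filter]
        have : (PySem.Set.ofList
            (((r :: rs).filter (fun x => !(clcKey x == clcKey r))).map clcKey)).filter
              (fun y => !(PySem.Set.contains [clcKey r] y)) =
            PySem.Set.ofList (((r :: rs).filter (fun x => !(clcKey x == clcKey r))).map clcKey) := by
          apply List.filter_eq_self.mpr
          intro y hy
          have hyne := hkne y hy
          have : ¬ (PySem.Set.contains [clcKey r] y = true) := fun hc =>
            hyne (by simpa using (PySem.Set.contains_iff _ _).mp hc)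
          simp [Bool.not_eq_true] at this
          simp [this]
        rw [this, List.singleton_append]
      have hrp : ((r :: rs).filter (fun x => !(clcKey x == clcKey r))).Pairwise
          (fun a b => clcKey5List a < clcKey5List b) := hp.filter _
      have hrl : ((r :: rs).filter (fun x => !(clcKey x == clcKey r))).length ≤ n := by
        rw [hrest]
        exact le_trans (List.length_filter_le _ _) (Nat.le_of_succ_le_succ hl)
      simp only [clcScan, htw, hdw]
      rw [PySem.List.foldl_prod_mk
          (f := fun (c : Int) x => if clcTag x == "O" then c + 1 else c)
          (g := fun (s : PySem.Set String) x => PySem.Set.add s (clcAllele x))]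
      rw [PySem.List.foldl_if_add_one, ← PySem.Set.update_map_eq_foldl_add, clc_update_empty]
      rw [ihn _ hrl hrp, hkeys, List.map_cons]
      congr 1
      · show _ = (clcKey r, _, _, _)
        have hG : clcG (r :: rs) (clcKey r) = (r :: rs).filter (fun x => clcKey x == clcKey r) := rfl
        rw [hG]
        simp [PySem.List.len_eq, PySem.Set.len]
      · apply List.map_congr_left
        intro k hk
        have hkne' : k ≠ clcKey r := hkne k hk
        have hGG : clcG ((r :: rs).filter (fun x => !(clcKey x == clcKey r))) k
            = clcG (r :: rs) k := by
          rw [clcG, clcG, List.filter_filter]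
          apply List.filter_congr
          intro x _
          by_cases hxk : clcKey x = k
          · simp [hxk]
            exact hkne'
          · simp [hxk]
        rw [hGG]

-- ===== A-side dict characterization (A's defaultdicts) =====
theorem clc_getD_setDict_aux (rows : List (String × String × String × String × String))
    (d : PySem.Dict (String × String × String) (PySem.Set String)) (k : String × String × String) :
    (rows.foldl
      (fun d r => d.modify (clcKey r) PySem.Set.empty (fun st => PySem.Set.add st (clcAllele r))) d).getD
      k PySem.Set.empty
      = PySem.Set.update (d.getD k PySem.Set.empty) (clcAll rows k) := by
  induction rows generalizing d with
  | nil => simp [clcAll, PySem.Set.update]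
  | cons r rows ih =>
    simp only [List.foldl_cons]
    rw [ih]
    by_cases h : clcKey r = k
    · subst h
      simp [clcAll, PySem.Dict.modify, PySem.Dict.getD_insert_self, PySem.Set.update]
    · have hne : k ≠ clcKey r := Ne.symm h
      simp [clcAll, h, PySem.Dict.modify, PySem.Dict.getD_insert_of_ne _ _ _ hne]

theorem clc_update_nil' {α : Type} [BEq α] (l : List α) :
    PySem.Set.update ([] : List α) l = PySem.Set.ofList l := by
  rw [PySem.Set.ofList_eq_foldl]; rfl

theorem clc_getD_setDict (rows : List (String × String × String × String × String)) (k : String × String × String) :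
    (clcSetDict rows).getD k PySem.Set.empty = clcOk rows k := by
  unfold clcSetDict clcOk
  rw [clc_getD_setDict_aux, PySem.Dict.getD_empty, clc_update_empty]

theorem clc_keys_setDict (rows : List (String × String × String × String × String)) :
    (clcSetDict rows).keys = PySem.Set.ofList (rows.map clcKey) := by
  unfold clcSetDict
  rw [PySem.Dict.keys_foldl_modify_key _ clcKey PySem.Set.empty
    (fun _ r => fun st => PySem.Set.add st (clcAllele r))]
  rw [PySem.Dict.keys_empty, clc_update_nil']

theorem clc_all_eq_nil_iff (rows : List (String × String × String × String × String)) (k : String × String × String) :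
    clcAll rows k = [] ↔ k ∉ rows.map clcKey := by
  simp only [clcAll, List.map_eq_nil_iff, List.filter_eq_nil_iff, List.mem_map, beq_iff_eq]
  constructor
  · rintro h ⟨r, hr, hk⟩
    exact h r hr hk
  · intro h r hr hk
    exact h ⟨r, hr, hk⟩

theorem clc_ofList_eq_nil_iff {α : Type} [BEq α] [LawfulBEq α] (l : List α) :
    PySem.Set.ofList l = [] ↔ l = [] := by
  cases l with
  | nil => simp
  | cons x xs =>
    constructor
    · intro h
      have hx : x ∈ PySem.Set.ofList (x :: xs) := (PySem.Set.mem_ofList _ _).mpr (by simp)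
      rw [h] at hx
      simp at hx
    · intro h
      simp at h

-- ===== tagged-record membership and counting =====
theorem clc_key_tagO (r : String × String × String × String × String) : clcKey (clcTagO r) = clcKey r := rfl
theorem clc_key_tagI (r : String × String × String × String × String) : clcKey (clcTagI r) = clcKey r := rfl

theorem clc_mem_recs_O (olga imgt : List (String × String × String × String × String))
    (x : String × String × String × String × String) :
    (x ∈ clcRecs olga imgt ∧ clcTag x = "O") ↔ x ∈ olga.map clcTagO := by
  rw [clc_mem_recs]
  constructor
  · rintro ⟨hx | hx, ht⟩
    · exact hx
    · exfalso
      obtain ⟨r, _, rfl⟩ := List.mem_map.mp hx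
      simp [clcTagI, clcTag] at ht
  · intro hx
    refine ⟨Or.inl hx, ?_⟩
    obtain ⟨r, _, rfl⟩ := List.mem_map.mp hx
    rfl

theorem clc_mem_recs_I (olga imgt : List (String × String × String × String × String))
    (x : String × String × String × String × String) :
    (x ∈ clcRecs olga imgt ∧ clcTag x ≠ "O") ↔ x ∈ imgt.map clcTagI := by
  rw [clc_mem_recs]
  constructor
  · rintro ⟨hx | hx, ht⟩
    · exfalso
      obtain ⟨r, _, rfl⟩ := List.mem_map.mp hx
      exact ht rfl
    · exact hx
  · intro hx
    refine ⟨Or.inr hx, ?_⟩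
    obtain ⟨r, _, rfl⟩ := List.mem_map.mp hx
    simp [clcTagI, clcTag]

-- a record with key k is its key, its allele and its tag
theorem clc_shape (x : String × String × String × String × String) (k : String × String × String)
    (h1 : clcKey x = k) (h2 : clcTag x = "O") : x = (k.1, k.2.1, k.2.2, clcAllele x, "O") := by
  obtain ⟨x1, x2, x3, x4, x5⟩ := x
  obtain ⟨k1, k2, k3⟩ := k
  simp only [clcKey, Prod.mk.injEq] at h1
  simp only [clcTag] at h2
  simp [clcAllele, h1.1, h1.2.1, h1.2.2, h2]

theorem clc_shape_I (x : String × String × String × String × String) (k : String × String × String)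
    (h1 : clcKey x = k) (h2 : clcTag x = "I") : x = (k.1, k.2.1, k.2.2, clcAllele x, "I") := by
  obtain ⟨x1, x2, x3, x4, x5⟩ := x
  obtain ⟨k1, k2, k3⟩ := k
  simp only [clcKey, Prod.mk.injEq] at h1
  simp only [clcTag] at h2
  simp [clcAllele, h1.1, h1.2.1, h1.2.2, h2]

theorem clc_allele_tagO (r : String × String × String × String × String) :
    clcAllele (clcTagO r) = clcAllele r := rfl
theorem clc_allele_tagI (r : String × String × String × String × String) :
    clcAllele (clcTagI r) = clcAllele r := rfl

theorem clc_mem_all (rows : List (String × String × String × String × String))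
    (k : String × String × String) (a : String) :
    a ∈ clcAll rows k ↔ ∃ r ∈ rows, clcKey r = k ∧ clcAllele r = a := by
  unfold clcAll
  rw [List.mem_map]
  constructor
  · rintro ⟨r, hr, ha⟩
    rw [List.mem_filter] at hr
    exact ⟨r, hr.1, by simpa using hr.2, ha⟩
  · rintro ⟨r, hr, hk, ha⟩
    exact ⟨r, List.mem_filter.mpr ⟨hr, by simp [hk]⟩, ha⟩

-- #O-tagged records at key k = #distinct OLGA alleles at k
theorem clc_filter_tag_O (olga imgt : List (String × String × String × String × String))
    (k : String × String × String) :
    ((clcG (clcRecs olga imgt) k).filter (fun x => clcTag x == "O")).length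
      = (clcOk olga k).length := by
  have hfil : (clcG (clcRecs olga imgt) k).filter (fun x => clcTag x == "O")
      = (clcRecs olga imgt).filter (fun x => (clcTag x == "O") && (clcKey x == k)) := by
    rw [clcG, List.filter_filter]
  rw [hfil]
  set l := (clcRecs olga imgt).filter (fun x => (clcTag x == "O") && (clcKey x == k)) with hl
  have hmeml : ∀ x, x ∈ l ↔ x ∈ clcRecs olga imgt ∧ clcTag x = "O" ∧ clcKey x = k := by
    intro x
    rw [hl, List.mem_filter]
    simp [and_assoc]
  have hnl : l.Nodup := (clc_nodup_recs olga imgt).filter _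
  have hmap : (l.map clcAllele).Nodup := by
    refine List.Nodup.map_on ?_ hnl
    intro x hx y hy hxy
    obtain ⟨_, htx, hkx⟩ := (hmeml x).mp hx
    obtain ⟨_, hty, hky⟩ := (hmeml y).mp hy
    rw [clc_shape x k hkx htx, clc_shape y k hky hty, hxy]
  have hmm : ∀ a, a ∈ l.map clcAllele ↔ a ∈ clcOk olga k := by
    intro a
    rw [List.mem_map]
    unfold clcOk
    rw [PySem.Set.mem_ofList, clc_mem_all]
    constructor
    · rintro ⟨x, hx, rfl⟩
      obtain ⟨hrec, htx, hkx⟩ := (hmeml x).mp hx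
      obtain ⟨r, hr, hxr⟩ := List.mem_map.mp ((clc_mem_recs_O olga imgt x).mp ⟨hrec, htx⟩)
      rw [← hxr] at hkx
      rw [clc_key_tagO] at hkx
      exact ⟨r, hr, hkx, by rw [← hxr, clc_allele_tagO]⟩
    · rintro ⟨r, hr, hk, rfl⟩
      refine ⟨clcTagO r, ?_, rfl⟩
      refine (hmeml _).mpr ⟨?_, rfl, (clc_key_tagO r).trans hk⟩
      exact (clc_mem_recs olga imgt _).mpr (Or.inl (List.mem_map.mpr ⟨r, hr, rfl⟩))
  calc l.length = (l.map clcAllele).length := by simp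
    _ = (clcOk olga k).length := clc_len_eq_of_mem _ _ hmap (PySem.Set.nodup_ofList _) hmm

theorem clc_filter_tag_I (olga imgt : List (String × String × String × String × String))
    (k : String × String × String) :
    ((clcG (clcRecs olga imgt) k).filter (fun x => !(clcTag x == "O"))).length
      = (clcOk imgt k).length := by
  have hfil : (clcG (clcRecs olga imgt) k).filter (fun x => !(clcTag x == "O"))
      = (clcRecs olga imgt).filter (fun x => !(clcTag x == "O") && (clcKey x == k)) := by
    rw [clcG, List.filter_filter]
  rw [hfil]
  set l := (clcRecs olga imgt).filter (fun x => !(clcTag x == "O") && (clcKey x == k)) with hl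
  have hmeml : ∀ x, x ∈ l ↔ x ∈ clcRecs olga imgt ∧ clcTag x ≠ "O" ∧ clcKey x = k := by
    intro x
    rw [hl, List.mem_filter]
    simp [and_assoc]
  have htI : ∀ x ∈ l, clcTag x = "I" := by
    intro x hx
    obtain ⟨hrec, htx, _⟩ := (hmeml x).mp hx
    obtain ⟨r, _, hxr⟩ := List.mem_map.mp ((clc_mem_recs_I olga imgt x).mp ⟨hrec, htx⟩)
    rw [← hxr]
    rfl
  have hnl : l.Nodup := (clc_nodup_recs olga imgt).filter _
  have hmap : (l.map clcAllele).Nodup := by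
    refine List.Nodup.map_on ?_ hnl
    intro x hx y hy hxy
    obtain ⟨_, _, hkx⟩ := (hmeml x).mp hx
    obtain ⟨_, _, hky⟩ := (hmeml y).mp hy
    rw [clc_shape_I x k hkx (htI x hx), clc_shape_I y k hky (htI y hy), hxy]
  have hmm : ∀ a, a ∈ l.map clcAllele ↔ a ∈ clcOk imgt k := by
    intro a
    rw [List.mem_map]
    unfold clcOk
    rw [PySem.Set.mem_ofList, clc_mem_all]
    constructor
    · rintro ⟨x, hx, rfl⟩
      obtain ⟨hrec, htx, hkx⟩ := (hmeml x).mp hx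
      obtain ⟨r, hr, hxr⟩ := List.mem_map.mp ((clc_mem_recs_I olga imgt x).mp ⟨hrec, htx⟩)
      rw [← hxr] at hkx
      rw [clc_key_tagI] at hkx
      exact ⟨r, hr, hkx, by rw [← hxr, clc_allele_tagI]⟩
    · rintro ⟨r, hr, hk, rfl⟩
      refine ⟨clcTagI r, ?_, rfl⟩
      refine (hmeml _).mpr ⟨?_, by simp [clcTagI, clcTag], (clc_key_tagI r).trans hk⟩
      exact (clc_mem_recs olga imgt _).mpr (Or.inr (List.mem_map.mpr ⟨r, hr, rfl⟩))
  calc l.length = (l.map clcAllele).length := by simp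
    _ = (clcOk imgt k).length := clc_len_eq_of_mem _ _ hmap (PySem.Set.nodup_ofList _) hmm

theorem clc_cntO (olga imgt : List (String × String × String × String × String))
    (k : String × String × String) :
    (clcG (clcRecs olga imgt) k).countP (fun x => clcTag x == "O") = (clcOk olga k).length := by
  rw [List.countP_eq_length_filter]
  exact clc_filter_tag_O olga imgt k

theorem clc_lenG (olga imgt : List (String × String × String × String × String))
    (k : String × String × String) :
    (clcG (clcRecs olga imgt) k).length = (clcOk olga k).length + (clcOk imgt k).length := by
  rw [List.length_eq_length_filter_add (f := fun x => clcTag x == "O")]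
  rw [clc_filter_tag_O olga imgt k, clc_filter_tag_I olga imgt k]

theorem clc_distinct (olga imgt : List (String × String × String × String × String))
    (k : String × String × String) :
    (PySem.Set.ofList ((clcG (clcRecs olga imgt) k).map clcAllele)).length
      = (PySem.Set.union (clcOk olga k) (clcOk imgt k)).length := by
  refine clc_len_eq_of_mem _ _ (PySem.Set.nodup_ofList _)
    (PySem.Set.nodup_union _ _ (PySem.Set.nodup_ofList _)) ?_
  intro a
  rw [PySem.Set.mem_ofList, PySem.Set.mem_union, List.mem_map]
  unfold clcOk
  rw [PySem.Set.mem_ofList, PySem.Set.mem_ofList, clc_mem_all, clc_mem_all]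
  constructor
  · rintro ⟨x, hx, rfl⟩
    rw [clcG, List.mem_filter] at hx
    have hkx : clcKey x = k := by simpa using hx.2
    rcases (clc_mem_recs olga imgt x).mp hx.1 with hm | hm
    · obtain ⟨r, hr, hxr⟩ := List.mem_map.mp hm
      rw [← hxr] at hkx
      rw [clc_key_tagO] at hkx
      exact Or.inl ⟨r, hr, hkx, by rw [← hxr, clc_allele_tagO]⟩
    · obtain ⟨r, hr, hxr⟩ := List.mem_map.mp hm
      rw [← hxr] at hkx
      rw [clc_key_tagI] at hkx
      exact Or.inr ⟨r, hr, hkx, by rw [← hxr, clc_allele_tagI]⟩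
  · rintro (⟨r, hr, hk, rfl⟩ | ⟨r, hr, hk, rfl⟩)
    · refine ⟨clcTagO r, ?_, rfl⟩
      rw [clcG, List.mem_filter]
      refine ⟨(clc_mem_recs olga imgt _).mpr (Or.inl (List.mem_map.mpr ⟨r, hr, rfl⟩)), ?_⟩
      simp [(clc_key_tagO r).trans hk]
    · refine ⟨clcTagI r, ?_, rfl⟩
      rw [clcG, List.mem_filter]
      refine ⟨(clc_mem_recs olga imgt _).mpr (Or.inr (List.mem_map.mpr ⟨r, hr, rfl⟩)), ?_⟩
      simp [(clc_key_tagI r).trans hk]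

-- ===== set-cardinality arithmetic (inclusion-exclusion on nodup lists) =====
theorem clc_inter_filter_len (o i : PySem.Set String) (ho : o.Nodup) (hi : i.Nodup) :
    (i.filter (fun x => decide (x ∈ o))).length = (PySem.Set.inter o i).length := by
  refine clc_len_eq_of_mem _ _ (hi.filter _) (PySem.Set.nodup_inter _ _ ho) ?_
  intro x
  rw [List.mem_filter, PySem.Set.mem_inter]
  simp [and_comm]

theorem clc_diff_add_inter (o i : PySem.Set String) (ho : o.Nodup) :
    (PySem.Set.diff o i).length + (PySem.Set.inter o i).length = o.length := by
  have h1 : (o.filter (fun x => decide (x ∈ i))).length = (PySem.Set.inter o i).length := by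
    refine clc_len_eq_of_mem _ _ (ho.filter _) (PySem.Set.nodup_inter _ _ ho) ?_
    intro x
    rw [List.mem_filter, PySem.Set.mem_inter]
    simp
  have h2 : (o.filter (fun x => !(decide (x ∈ i)))).length = (PySem.Set.diff o i).length := by
    refine clc_len_eq_of_mem _ _ (ho.filter _) (PySem.Set.nodup_diff _ _ ho) ?_
    intro x
    rw [List.mem_filter, PySem.Set.mem_diff]
    simp
  have h3 := List.length_eq_length_filter_add (l := o) (fun x => decide (x ∈ i))
  omega

theorem clc_union_add_inter (o i : PySem.Set String) (ho : o.Nodup) (hi : i.Nodup) :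
    (PySem.Set.union o i).length + (PySem.Set.inter o i).length = o.length + i.length := by
  have h1 : (PySem.Set.union o i).length = o.length + (i.filter (fun x => !(decide (x ∈ o)))).length := by
    have := clc_len_eq_of_mem (PySem.Set.union o i) (o ++ i.filter (fun x => !(decide (x ∈ o))))
      (PySem.Set.nodup_union _ _ ho) ?_ ?_
    · rw [this, List.length_append]
    · refine List.Nodup.append ho (hi.filter _) ?_
      intro x hxo hxf
      rw [List.mem_filter] at hxf
      simp at hxf
      exact hxf.2 hxo
    · intro x
      rw [PySem.Set.mem_union, List.mem_append, List.mem_filter]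
      simp
      tauto
  have h2 := List.length_eq_length_filter_add (l := i) (fun x => decide (x ∈ o))
  have h3 := clc_inter_filter_len o i ho hi
  omega

-- ===== the sorted key lists agree =====
theorem clc_dedup_pairwise (xs : List (String × String × String × String × String))
    (h : xs.Pairwise (fun a b => clcKey5List a < clcKey5List b)) :
    (PySem.Set.ofList (xs.map clcKey)).Pairwise (fun a b => clcKeyList a < clcKeyList b) := by
  induction xs using List.reverseRecOn with
  | nil => simp
  | append_singleton xs x ih =>
    rw [List.pairwise_append] at h
    rw [List.map_append, List.map_cons, List.map_nil, PySem.Set.ofList_append_singleton,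
      PySem.Set.add_eq_ite]
    split_ifs with hmem
    · exact ih h.1
    · rw [List.pairwise_append]
      refine ⟨ih h.1, List.pairwise_singleton _ _, ?_⟩
      intro a ha b hb
      simp only [List.mem_cons, List.not_mem_nil, or_false] at hb
      subst hb
      obtain ⟨c, hc, rfl⟩ := List.mem_map.mp ((PySem.Set.mem_ofList _ _).mp ha)
      have hle := clc_lt5_le3 c x (h.2.2 c hc x (by simp))
      refine lt_of_le_of_ne hle ?_
      intro he
      have : clcKey c = clcKey x := clcKeyList_injective he
      rw [this] at ha
      exact hmem ha

theorem clc_mem_keys (olga imgt : List (String × String × String × String × String))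
    (k : String × String × String) :
    k ∈ (clcRecs olga imgt).map clcKey
      ↔ k ∈ olga.map clcKey ∨ k ∈ imgt.map clcKey := by
  rw [List.mem_map]
  constructor
  · rintro ⟨x, hx, rfl⟩
    rcases (clc_mem_recs olga imgt x).mp hx with hm | hm
    · obtain ⟨r, hr, hxr⟩ := List.mem_map.mp hm
      exact Or.inl (List.mem_map.mpr ⟨r, hr, by rw [← hxr, clc_key_tagO]⟩)
    · obtain ⟨r, hr, hxr⟩ := List.mem_map.mp hm
      exact Or.inr (List.mem_map.mpr ⟨r, hr, by rw [← hxr, clc_key_tagI]⟩)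
  · rintro (hm | hm)
    · obtain ⟨r, hr, hxr⟩ := List.mem_map.mp hm
      exact ⟨clcTagO r, (clc_mem_recs olga imgt _).mpr (Or.inl (List.mem_map.mpr ⟨r, hr, rfl⟩)),
        (clc_key_tagO r).trans hxr⟩
    · obtain ⟨r, hr, hxr⟩ := List.mem_map.mp hm
      exact ⟨clcTagI r, (clc_mem_recs olga imgt _).mpr (Or.inr (List.mem_map.mpr ⟨r, hr, rfl⟩)),
        (clc_key_tagI r).trans hxr⟩

theorem clc_keys_eq (olga imgt : List (String × String × String × String × String)) :
    PySem.List.sorted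
        (PySem.Set.union (PySem.Set.ofList (clcSetDict olga).keys) (PySem.Set.ofList (clcSetDict imgt).keys))
        clcKeyList
      = PySem.Set.ofList ((clcRecs olga imgt).map clcKey) := by
  refine (clc_sorted_inst _ _).trans (PySem.List.sorted_eq_of_perm_of_pairwise_lt _ _ _ ?_ ?_)
  · rw [List.perm_ext_iff_of_nodup (PySem.Set.nodup_ofList _)
      (PySem.Set.nodup_union _ _ (PySem.Set.nodup_ofList _))]
    intro k
    simp only [PySem.Set.mem_ofList, clc_mem_keys, PySem.Set.mem_union, clc_keys_setDict]
  · exact clc_dedup_pairwise _ (clc_pairwise_recs olga imgt)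

-- the Int count test of Source B names emptiness of the other library's allele set
theorem clc_cnt_zero_iff (rows : List (String × String × String × String × String))
    (k : String × String × String) :
    (((clcOk rows k).length : Int) == 0) = true ↔ k ∉ rows.map clcKey := by
  rw [beq_iff_eq]
  constructor
  · intro h
    have : clcOk rows k = [] := List.eq_nil_of_length_eq_zero (by exact_mod_cast h)
    rw [clcOk, clc_ofList_eq_nil_iff] at this
    exact (clc_all_eq_nil_iff rows k).mp this
  · intro h
    have : clcAll rows k = [] := (clc_all_eq_nil_iff rows k).mpr h
    simp [clcOk, this]

theorem clc_only_o (olga imgt : List (String × String × String × String × String)) :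
    PySem.List.sorted
        (PySem.Set.diff (PySem.Set.ofList (clcSetDict olga).keys) (PySem.Set.ofList (clcSetDict imgt).keys))
        clcKeyList
      = (PySem.Set.ofList ((clcRecs olga imgt).map clcKey)).filter
          (fun k => ((clcOk imgt k).length : Int) == 0) := by
  refine (clc_sorted_inst _ _).trans (PySem.List.sorted_eq_of_perm_of_pairwise_lt _ _ _ ?_ ?_)
  · rw [List.perm_ext_iff_of_nodup ((PySem.Set.nodup_ofList _).filter _)
      (PySem.Set.nodup_diff _ _ (PySem.Set.nodup_ofList _))]
    intro k
    simp only [List.mem_filter, PySem.Set.mem_ofList, clc_mem_keys, PySem.Set.mem_diff,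
      clc_keys_setDict, clc_cnt_zero_iff]
    tauto
  · exact (clc_dedup_pairwise _ (clc_pairwise_recs olga imgt)).filter _

theorem clc_only_i (olga imgt : List (String × String × String × String × String)) :
    PySem.List.sorted
        (PySem.Set.diff (PySem.Set.ofList (clcSetDict imgt).keys) (PySem.Set.ofList (clcSetDict olga).keys))
        clcKeyList
      = (PySem.Set.ofList ((clcRecs olga imgt).map clcKey)).filter
          (fun k => ((clcOk olga k).length : Int) == 0) := by
  refine (clc_sorted_inst _ _).trans (PySem.List.sorted_eq_of_perm_of_pairwise_lt _ _ _ ?_ ?_)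
  · rw [List.perm_ext_iff_of_nodup ((PySem.Set.nodup_ofList _).filter _)
      (PySem.Set.nodup_diff _ _ (PySem.Set.nodup_ofList _))]
    intro k
    simp only [List.mem_filter, PySem.Set.mem_ofList, clc_mem_keys, PySem.Set.mem_diff,
      clc_keys_setDict, clc_cnt_zero_iff]
    tauto
  · exact (clc_dedup_pairwise _ (clc_pairwise_recs olga imgt)).filter _

-- ===== B's scan result in terms of A's allele sets =====
theorem clc_rows_eq (olga imgt : List (String × String × String × String × String)) :
    clcScan (clcRecs olga imgt) = (PySem.Set.ofList ((clcRecs olga imgt).map clcKey)).map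
      (fun k => (k, ((clcOk olga k).length : Int), ((clcOk imgt k).length : Int),
        ((PySem.Set.inter (clcOk olga k) (clcOk imgt k)).length : Int))) := by
  rw [clc_scan_eq (clcRecs olga imgt).length _ le_rfl (clc_pairwise_recs olga imgt)]
  apply List.map_congr_left
  intro k _
  have h1 := clc_cntO olga imgt k
  have h2 := clc_lenG olga imgt k
  have h3 := clc_distinct olga imgt k
  have h4 := clc_union_add_inter (clcOk olga k) (clcOk imgt k)
    (PySem.Set.nodup_ofList _) (PySem.Set.nodup_ofList _)
  simp only [Prod.mk.injEq]
  refine ⟨trivial, by omega, by omega, by omega⟩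

theorem clc_countline (olga imgt : List (String × String × String × String × String))
    (k : String × String × String) :
    clcCountLine k (clcOk olga k) (clcOk imgt k)
      = clcCountLineN k ((clcOk olga k).length : Int) ((clcOk imgt k).length : Int)
          ((PySem.Set.inter (clcOk olga k) (clcOk imgt k)).length : Int) := by
  have hdoi := clc_diff_add_inter (clcOk olga k) (clcOk imgt k) (PySem.Set.nodup_ofList _)
  have hdio := clc_diff_add_inter (clcOk imgt k) (clcOk olga k) (PySem.Set.nodup_ofList _)
  have hic : (PySem.Set.inter (clcOk imgt k) (clcOk olga k)).length
      = (PySem.Set.inter (clcOk olga k) (clcOk imgt k)).length := by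
    refine clc_len_eq_of_mem _ _ (PySem.Set.nodup_inter _ _ (PySem.Set.nodup_ofList _))
      (PySem.Set.nodup_inter _ _ (PySem.Set.nodup_ofList _)) ?_
    intro x
    rw [PySem.Set.mem_inter, PySem.Set.mem_inter]
    exact and_comm
  have e0 : ∀ (s : PySem.Set String), PySem.Set.len s = (s.length : Int) := by
    intro s
    simp [PySem.Set.len, PySem.List.len_eq]
  unfold clcCountLine clcCountLineN
  simp only [e0]
  have e1 : ((PySem.Set.diff (clcOk olga k) (clcOk imgt k)).length : Int)
      = ((clcOk olga k).length : Int)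
        - ((PySem.Set.inter (clcOk olga k) (clcOk imgt k)).length : Int) := by omega
  have e2 : ((PySem.Set.diff (clcOk imgt k) (clcOk olga k)).length : Int)
      = ((clcOk imgt k).length : Int)
        - ((PySem.Set.inter (clcOk olga k) (clcOk imgt k)).length : Int) := by omega
  rw [e1, e2]

-- ===== VERDICT (by name: the statement is the Claim_ definition above) =====
theorem clc_isEmpty_map {α β : Type} (f : α → β) (l : List α) :
    (l.map f).isEmpty = l.isEmpty := by
  cases l <;> simp

theorem check_library_consistency_spec : Claim_equal_check_library_consistency := by
  intro olga imgt _
  show check_library_consistency olga imgt = check_library_consistency_alt olga imgt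
  have hget : ∀ (rows : List (String × String × String × String × String))
      (k : String × String × String),
      ((clcSetDict rows).get? k).getD PySem.Set.empty = clcOk rows k := by
    intro rows k
    have := clc_getD_setDict rows k
    simpa [PySem.Dict.getD] using this
  simp only [check_library_consistency, check_library_consistency_alt]
  rw [clc_rows_eq olga imgt, clc_keys_eq olga imgt, clc_only_o olga imgt, clc_only_i olga imgt]
  simp only [List.filter_map, List.map_map, Function.comp, clc_isEmpty_map,
    PySem.List.foldl_append_singleton_eq_map, hget, clc_getD_setDict, clc_countline,
    PySem.Set.len, PySem.List.len_eq]
  simp only [Function.comp_def]
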